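-- pv_equiv track=rewrite | github.com/KPvivid/listen_swarm | listen_swarm/voice2csv.py | splitToPhase
-- ===== SOURCE A (Python) =====
-- def splitToPhase(list_phase,rev_list_word,list_action):
--     def common_member(a, b):
--         a_set = set(a)
--         b_set = set(b)
--         if len(a_set.intersection(b_set)) > 0:
--             return(True)
--         return(False)
--
--     if common_member(list_action,rev_list_word):
--         for i in range(len(rev_list_word)):
--             if rev_list_word[i] in list_action:
--                 list_phase.append(rev_list_word[:i+1])
--                 return [rev_list_word[:i+1]] + splitToPhase(list_phase, rev_list_word[i+1:],list_action)
--     return []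
-- ===== SOURCE B (Python) =====
-- def splitToPhase(list_phase, rev_list_word, list_action):
--     # Same return value as A; also performs the same list_phase mutation (appends each phrase).
--     actions = set(list_action)
--     phrases = []
--     cur = []
--     for w in rev_list_word:
--         cur.append(w)
--         if w in actions:
--             phrases.append(cur)
--             cur = []
--     list_phase.extend(phrases)
--     return phrases
-- ===== Notes on version B (the rewrite author's own statement) =====
-- stated objective: faster
-- what changed: Replaced A's recursive scheme (set-intersection membership test plus a fresh index scan from 0 on every remaining suffix, slicing out one phrase per recursion step) by a single left-to-right pass that accumulates the current phrase and cuts it whenever the word is in a precomputed action set.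
import Mathlib
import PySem

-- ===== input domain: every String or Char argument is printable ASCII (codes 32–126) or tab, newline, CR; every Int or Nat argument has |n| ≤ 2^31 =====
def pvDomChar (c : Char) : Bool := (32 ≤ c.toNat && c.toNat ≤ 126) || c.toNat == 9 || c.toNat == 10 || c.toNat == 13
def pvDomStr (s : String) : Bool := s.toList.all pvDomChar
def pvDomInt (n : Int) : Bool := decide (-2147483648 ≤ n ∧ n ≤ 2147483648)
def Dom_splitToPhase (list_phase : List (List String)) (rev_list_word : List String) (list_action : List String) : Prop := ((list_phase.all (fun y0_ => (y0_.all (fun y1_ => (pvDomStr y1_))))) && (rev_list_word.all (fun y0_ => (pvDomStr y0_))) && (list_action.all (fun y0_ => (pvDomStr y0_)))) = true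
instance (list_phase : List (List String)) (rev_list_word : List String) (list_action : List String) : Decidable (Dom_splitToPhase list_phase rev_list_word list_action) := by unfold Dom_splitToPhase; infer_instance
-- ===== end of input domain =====

-- B replaces A's quadratic recursion (set-intersection test + rescan from index 0 on every
-- suffix) by one linear pass cutting at each action word; equivalence is about the RETURN
-- value (both Pythons also append the same phrases to list_phase).

-- ===== PORT A =====
-- common_member(a, b): len(set(a) & set(b)) > 0
def pvCommonMember (a b : List String) : Bool :=
  let aSet := PySem.Set.ofList a
  let bSet := PySem.Set.ofList b
  decide (0 < (PySem.Set.inter aSet bSet).length)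

def splitToPhase (list_phase : List (List String)) (rev_list_word : List String) (list_action : List String) : List (List String) :=
  if pvCommonMember list_action rev_list_word then
    -- for i in range(len(rev_list_word)): if rev_list_word[i] in list_action: return …
    match h : rev_list_word.findIdx? (fun w => list_action.contains w) with
    | some i =>
        rev_list_word.take (i+1) :: splitToPhase list_phase (rev_list_word.drop (i+1)) list_action
    | none => []
  else []
termination_by rev_list_word.length
decreasing_by
  have hne : rev_list_word ≠ [] := by rintro rfl; simp at h
  have hpos : 0 < rev_list_word.length := List.length_pos_of_ne_nil hne
  simp only [List.length_drop]
  omega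

-- ===== PORT B =====
def splitToPhase_alt (list_phase : List (List String)) (rev_list_word : List String) (list_action : List String) : List (List String) :=
  let actions := PySem.Set.ofList list_action
  (rev_list_word.foldl
    (fun (st : List (List String) × List String) w =>
      let cur := st.2 ++ [w]
      if PySem.Set.contains actions w then (st.1 ++ [cur], ([] : List String)) else (st.1, cur))
    (([] : List (List String)), ([] : List String))).1

-- ===== PRECONDITION & SPEC =====
def Spec_splitToPhase (list_phase : List (List String)) (rev_list_word : List String) (list_action : List String) (out : List (List String)) : Prop := out = splitToPhase_alt list_phase rev_list_word list_action
instance (list_phase : List (List String)) (rev_list_word : List String) (list_action : List String) (out : List (List String)) : Decidable (Spec_splitToPhase list_phase rev_list_word list_action out) := by unfold Spec_splitToPhase; infer_instance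

-- ===== CLAIM (what is proved, stated in full; the proofs are below) =====
def Claim_equal_splitToPhase : Prop := ∀ (list_phase : List (List String)) (rev_list_word : List String) (list_action : List String), Dom_splitToPhase list_phase rev_list_word list_action → Spec_splitToPhase list_phase rev_list_word list_action (splitToPhase list_phase rev_list_word list_action)

-- ===== LEMMAS AND PROOFS =====

-- the phrases produced by B's single pass, as a recursion (proof-side helper)
def pvAux (list_action : List String) : List String → List String → List (List String)
  | [], _ => []
  | w :: ws, cur =>
      if list_action.contains w then (cur ++ [w]) :: pvAux list_action ws []
      else pvAux list_action ws (cur ++ [w])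

theorem pv_fold_eq (acts : List String) :
    ∀ (ws : List String) (phr : List (List String)) (cur : List String),
      (ws.foldl
        (fun (st : List (List String) × List String) w =>
          let cur := st.2 ++ [w]
          if PySem.Set.contains (PySem.Set.ofList acts) w then (st.1 ++ [cur], ([] : List String)) else (st.1, cur))
        (phr, cur)).1 = phr ++ pvAux acts ws cur := by
  intro ws
  induction ws with
  | nil => intro phr cur; simp [pvAux]
  | cons w ws ih =>
      intro phr cur
      by_cases hw : w ∈ acts
      · have h2 := ih (phr ++ [cur ++ [w]]) []
        simp only [pvAux]
        simp [hw] at h2 ⊢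
        simp [h2]
      · have h2 := ih phr (cur ++ [w])
        simp only [pvAux]
        simp [hw] at h2 ⊢
        simp [h2]

theorem pv_aux_match (acts : List String) :
    ∀ (ws : List String) (cur : List String),
      pvAux acts ws cur =
        match ws.findIdx? (fun w => acts.contains w) with
        | some i => (cur ++ ws.take (i+1)) :: pvAux acts (ws.drop (i+1)) []
        | none => [] := by
  intro ws
  induction ws with
  | nil => intro cur; simp [pvAux]
  | cons w ws ih =>
      intro cur
      by_cases hw : acts.contains w = true
      · simp only [pvAux, List.findIdx?_cons, hw, ite_true]
        simp
      · have hw' : acts.contains w = false := by simpa using hw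
        simp only [pvAux, List.findIdx?_cons, hw', Bool.false_eq_true, ite_false,
          ih (cur ++ [w])]
        cases hfi : ws.findIdx? (fun w => acts.contains w) with
        | none => simp
        | some i => simp [List.take_succ_cons, List.drop_succ_cons]

theorem pv_common_iff (acts ws : List String) :
    pvCommonMember acts ws = true ↔ (ws.findIdx? (fun w => acts.contains w)).isSome = true := by
  simp only [pvCommonMember, decide_eq_true_eq, List.length_pos_iff, ne_eq]
  rw [List.findIdx?_isSome, List.any_eq_true]
  constructor
  · intro h
    obtain ⟨x, hx⟩ := List.exists_mem_of_ne_nil _ h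
    have hx' := (PySem.Set.mem_inter _ _ _).1 hx
    exact ⟨x, (PySem.Set.mem_ofList _ _).1 hx'.2, by
      simp [(PySem.Set.mem_ofList _ _).1 hx'.1]⟩
  · intro h hnil
    obtain ⟨x, hxw, hxa⟩ := h
    have hmem : x ∈ PySem.Set.inter (PySem.Set.ofList acts) (PySem.Set.ofList ws) := by
      rw [PySem.Set.mem_inter, PySem.Set.mem_ofList, PySem.Set.mem_ofList]
      exact ⟨by simpa using hxa, hxw⟩
    rw [hnil] at hmem
    simp at hmem

theorem pv_A_eq_aux (acts : List String) :
    ∀ (n : Nat) (ws : List String), ws.length ≤ n →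
      ∀ (lp : List (List String)), splitToPhase lp ws acts = pvAux acts ws [] := by
  intro n
  induction n with
  | zero =>
      intro ws hlen lp
      have hnil : ws = [] := List.eq_nil_of_length_eq_zero (Nat.le_zero.1 hlen)
      subst hnil
      rw [splitToPhase]
      simp [pvCommonMember, pvAux, PySem.Set.inter]
  | succ n ih =>
      intro ws hlen lp
      rw [splitToPhase, pv_aux_match]
      by_cases hc : pvCommonMember acts ws = true
      · rw [if_pos hc]
        cases hfi : ws.findIdx? (fun w => acts.contains w) with
        | none => simp
        | some i =>
            have hne : ws ≠ [] := by rintro rfl; simp at hfi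
            have hlt : (ws.drop (i+1)).length ≤ n := by
              have hpos : 0 < ws.length := List.length_pos_of_ne_nil hne
              simp only [List.length_drop]; omega
            simp [ih _ hlt lp]
      · have hnone : ws.findIdx? (fun w => acts.contains w) = none := by
          cases hfi : ws.findIdx? (fun w => acts.contains w) with
          | none => rfl
          | some i =>
              exact absurd ((pv_common_iff acts ws).2 (by rw [hfi]; rfl)) hc
        rw [if_neg hc, hnone]

-- ===== VERDICT (by name: the statement is the Claim_ definition above) =====
theorem splitToPhase_spec : Claim_equal_splitToPhase := by
  intro lp ws acts _
  unfold Spec_splitToPhase splitToPhase_alt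
  rw [pv_fold_eq acts ws [] []]
  simp [pv_A_eq_aux acts ws.length ws le_rfl lp]
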